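-- pv_equiv track=rewrite | github.com/Alpha-Leporis/code | questions/HR/getMinLength.py | getMinLength
-- ===== SOURCE A (Python) =====
-- def getMinLength(seq):
--     stack = []
--     for char in seq:
--         if char == 'A':
--             if stack and stack[-1] == 'B':
--                 stack.pop()
--             else:
--                 stack.append(char)
--         elif char == 'B':
--             if stack and stack[-1] == 'B':
--                 stack.pop()
--             else:
--                 stack.append(char)
--     return len(stack)
-- ===== SOURCE B (Python) =====
-- def getMinLength(seq):
--     # Stage 1: keep only the relevant characters.
--     rel = [c for c in seq if c == 'A' or c == 'B']
--     # Stage 2: pair-skipping scan: a 'B' consumes itself and the next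
--     # relevant character (they cancel); every other surviving char counts.
--     n = len(rel)
--     i = 0
--     length = 0
--     while i < n:
--         if rel[i] == 'B':
--             if i + 1 == n:
--                 length += 1  # lone trailing 'B' survives
--             i += 2
--         else:
--             length += 1
--             i += 1
--     return length
-- ===== Notes on version B (the rewrite author's own statement) =====
-- stated objective: alternative
-- what changed: Replaces the stack simulation with a staged algorithm: first filter the string to its 'A'/'B' characters, then count survivors with a pair-skipping index scan in which each 'B' cancels itself together with the next relevant character (a lone trailing 'B' survives); no stack or push/pop state is kept.
import Mathlib
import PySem

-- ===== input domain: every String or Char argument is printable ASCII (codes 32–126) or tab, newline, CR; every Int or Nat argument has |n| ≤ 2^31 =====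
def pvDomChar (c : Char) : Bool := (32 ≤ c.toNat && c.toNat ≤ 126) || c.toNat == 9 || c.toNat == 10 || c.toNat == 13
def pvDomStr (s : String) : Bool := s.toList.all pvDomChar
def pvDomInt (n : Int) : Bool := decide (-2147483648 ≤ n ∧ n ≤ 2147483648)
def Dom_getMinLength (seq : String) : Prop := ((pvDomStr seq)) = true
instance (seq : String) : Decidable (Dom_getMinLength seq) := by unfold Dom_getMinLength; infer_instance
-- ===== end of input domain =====

-- B replaces A's stack simulation with two stages: filter to the 'A'/'B' chars,
-- then a pair-skipping scan where each 'B' cancels itself and the next relevant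
-- char (a lone trailing 'B' survives); same O(n) cost, different algorithm.

-- ===== PORT A =====
-- one loop step of A: push/pop on the explicit stack (list end = Python list end)
def pvStepA (stack : List Char) (c : Char) : List Char :=
  if c = 'A' then
    if stack ≠ [] ∧ stack.getLast? = some 'B' then stack.dropLast else stack ++ [c]
  else if c = 'B' then
    if stack ≠ [] ∧ stack.getLast? = some 'B' then stack.dropLast else stack ++ [c]
  else stack

def getMinLength (seq : String) : Int :=
  ((seq.toList.foldl pvStepA []).length : Int)

-- ===== PORT B =====
-- Source B's while-loop over indices i (i += 1 or i += 2), as recursion on the suffix rel[i:]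
def pvReduce : List Char → Int
  | [] => 0
  | c :: rest =>
    if c = 'B' then
      match rest with
      | [] => 1            -- lone trailing 'B'
      | _ :: rest' => pvReduce rest'   -- 'B' cancels with the next relevant char
    else 1 + pvReduce rest

def getMinLength_alt (seq : String) : Int :=
  pvReduce (seq.toList.filter (fun c => c == 'A' || c == 'B'))

-- ===== PRECONDITION & SPEC =====
def Spec_getMinLength (seq : String) (out : Int) : Prop := out = getMinLength_alt seq
instance (seq : String) (out : Int) : Decidable (Spec_getMinLength seq out) := by unfold Spec_getMinLength; infer_instance

-- ===== CLAIM (what is proved, stated in full; the proofs are below) =====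
def Claim_equal_getMinLength : Prop := ∀ (seq : String), Dom_getMinLength seq → Spec_getMinLength seq (getMinLength seq)

-- ===== LEMMAS AND PROOFS =====

-- scalar mirror of A's stack state: (number of 'A's, top-is-'B' flag); proofs only
def pvStepN (s : Nat × Bool) (c : Char) : Nat × Bool :=
  if c = 'A' ∨ c = 'B' then
    if s.2 then (s.1, false)
    else if c = 'B' then (s.1, true)
    else (s.1 + 1, s.2)
  else s

-- the shape A's stack always has: k copies of 'A', optionally one 'B' on top
def pvRepr (k : Nat) (b : Bool) : List Char :=
  List.replicate k 'A' ++ (if b then ['B'] else [])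

-- value of pvReduce when entered with the flag already set
def pvTail : List Char → Int
  | [] => 1
  | _ :: cs => pvReduce cs

theorem pvStepA_repr (k : Nat) (b : Bool) (c : Char) :
    pvStepA (pvRepr k b) c = pvRepr (pvStepN (k, b) c).1 (pvStepN (k, b) c).2 := by
  cases b <;> simp only [pvRepr, pvStepA, pvStepN] <;>
    by_cases hA : c = 'A' <;> by_cases hB : c = 'B' <;>
      simp_all [List.replicate_succ', List.getLast?_replicate]

theorem pvFoldA_repr (cs : List Char) : ∀ (k : Nat) (b : Bool),
    List.foldl pvStepA (pvRepr k b) cs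
      = pvRepr (List.foldl pvStepN (k, b) cs).1 (List.foldl pvStepN (k, b) cs).2 := by
  induction cs with
  | nil => intro k b; rfl
  | cons c cs ih =>
      intro k b
      simp only [List.foldl_cons, pvStepA_repr]
      exact ih _ _

theorem pvRepr_length (k : Nat) (b : Bool) :
    (pvRepr k b).length = k + (if b then 1 else 0) := by
  cases b <;> simp [pvRepr]

-- pvStepN ignores irrelevant characters, so the fold only sees the filtered list
theorem pvFoldN_filter (cs : List Char) : ∀ (s : Nat × Bool),
    List.foldl pvStepN s cs
      = List.foldl pvStepN s (cs.filter (fun c => c == 'A' || c == 'B')) := by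
  induction cs with
  | nil => intro s; rfl
  | cons c cs ih =>
      intro s
      by_cases hA : c = 'A' <;> by_cases hB : c = 'B' <;>
        simp [hA, hB, ih, pvStepN]

-- on a relevant-only list, the scalar fold's value is k + pvReduce/pvTail
theorem pvFoldN_reduce (cs : List Char)
    (h : ∀ c ∈ cs, c = 'A' ∨ c = 'B') : ∀ (k : Nat) (b : Bool),
    (((List.foldl pvStepN (k, b) cs).1 : Int)
        + (if (List.foldl pvStepN (k, b) cs).2 then 1 else 0))
      = (k : Int) + (if b then pvTail cs else pvReduce cs) := by
  induction cs with
  | nil => intro k b; cases b <;> simp [pvTail, pvReduce]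
  | cons c cs ih =>
      intro k b
      have hc := h c (List.mem_cons_self)
      have h' : ∀ x ∈ cs, x = 'A' ∨ x = 'B' := fun x hx => h x (List.mem_cons_of_mem _ hx)
      cases b with
      | true =>
          have hstep : pvStepN (k, true) c = (k, false) := by
            rcases hc with h1 | h1 <;> simp [pvStepN, h1]
          simp only [List.foldl_cons, hstep, ih h', pvTail]
          simp
      | false =>
          rcases hc with h1 | h1 <;> subst h1
          · -- c = 'A'
            have hstep : pvStepN (k, false) 'A' = (k + 1, false) := by
              simp [pvStepN]
            simp only [List.foldl_cons, hstep, ih h']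
            rw [show pvReduce ('A' :: cs) = 1 + pvReduce cs by rw [pvReduce.eq_def]; simp]
            push_cast
            ring
          · -- c = 'B'
            have hstep : pvStepN (k, false) 'B' = (k, true) := by simp [pvStepN]
            simp only [List.foldl_cons, hstep, ih h']
            cases cs <;> simp [pvTail, pvReduce]

-- ===== VERDICT (by name: the statement is the Claim_ definition above) =====
theorem getMinLength_spec : Claim_equal_getMinLength := by
  intro seq _
  show getMinLength seq = getMinLength_alt seq
  have hrel : ∀ c ∈ seq.toList.filter (fun c => c == 'A' || c == 'B'),
      c = 'A' ∨ c = 'B' := by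
    intro c hc
    have := (List.mem_filter.mp hc).2
    simpa using this
  simp only [getMinLength, getMinLength_alt]
  rw [show ([] : List Char) = pvRepr 0 false from rfl, pvFoldA_repr, pvRepr_length,
    pvFoldN_filter]
  have := pvFoldN_reduce _ hrel 0 false
  push_cast
  push_cast at this
  simpa using this
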